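-- pv_equiv track=rewrite | github.com/gigantemental/Python-Ejercicios | Ejercicios de Cadenas (Soluciones).py | cambiar_x2
-- ===== SOURCE A (Python) =====
-- def cambiar_x2(cad, rmax):
--     """DocString
--     """
--     if rmax == 0:
--         return cad
--     salida = ""
--     rep = 0
--     digitos = "0123456789"
--     lon = len(cad)
--     for i in range(lon):
--         if cad[i] in digitos:
--             salida += "X"
--             rep += 1
--             if rep == rmax:
--                 salida += cad[i+1:]
--                 break
--         else:
--             salida += cad[i]
--     return salida
-- ===== SOURCE B (Python) =====
-- def cambiar_x2(cad, rmax):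
--     if rmax == 0:
--         return cad
--     positions = [i for i, c in enumerate(cad) if c.isdigit()]
--     if rmax < 0 or rmax > len(positions):
--         cut = len(cad)
--     else:
--         cut = positions[rmax - 1] + 1
--     return "".join("X" if c.isdigit() else c for c in cad[:cut]) + cad[cut:]
-- ===== Notes on version B (the rewrite author's own statement) =====
-- stated objective: idiomatic
-- what changed: Replaces A's single stateful loop (output accumulator, replacement counter, mid-loop break with tail slice) by three stateless stages: collect the digit positions, compute the cut index after the rmax-th digit (whole string for negative or too-large rmax), then map every digit to 'X' before the cut and append the untouched tail.
import Mathlib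
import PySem

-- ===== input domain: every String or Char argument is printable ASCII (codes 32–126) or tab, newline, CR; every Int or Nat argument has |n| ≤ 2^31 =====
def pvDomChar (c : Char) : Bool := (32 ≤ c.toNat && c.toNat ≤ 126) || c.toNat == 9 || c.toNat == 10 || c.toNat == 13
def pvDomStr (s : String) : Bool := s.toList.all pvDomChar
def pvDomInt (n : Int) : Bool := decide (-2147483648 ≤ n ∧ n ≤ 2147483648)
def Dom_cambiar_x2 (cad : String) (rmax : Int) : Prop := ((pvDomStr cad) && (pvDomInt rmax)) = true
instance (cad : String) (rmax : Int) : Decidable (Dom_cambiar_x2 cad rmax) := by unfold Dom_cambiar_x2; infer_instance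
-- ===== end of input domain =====

-- B replaces A's stateful loop (accumulator, counter, break + tail slice) by three stateless
-- stages: digit positions, a cut index, map-before-cut ++ untouched tail (idiomatic rewrite).


-- ===== PORT A =====
-- A's for-loop with `salida`, counter `rep` and the `break` that appends cad[i+1:]:
-- recursion over the remaining characters (the loop suffix); the accumulated `salida`
-- is the characters already emitted, so it becomes the cons-prefix of the result.
def cambiarALoop (rmax : Int) : List Char → Int → List Char
  | [], _ => []
  | c :: rest, rep =>
    if PySem.Chars.isIn [c] ("0123456789".toList) then   -- cad[i] in digitos
      if rep + 1 = rmax then 'X' :: rest                  -- salida += "X"; rep == rmax: append cad[i+1:], break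
      else 'X' :: cambiarALoop rmax rest (rep + 1)
    else c :: cambiarALoop rmax rest rep

def cambiar_x2 (cad : String) (rmax : Int) : String :=
  if rmax = 0 then cad
  else String.ofList (cambiarALoop rmax cad.toList 0)

-- ===== PORT B =====
-- [i for i, c in enumerate(cad) if c.isdigit()]: the comprehension over enumerate,
-- as a recursion carrying the running index (isdigit is exact on the ASCII domain).
def digitPositions : List Char → Int → List Int
  | [], _ => []
  | c :: rest, i =>
    if PySem.Chars.isdigit c then i :: digitPositions rest (i + 1)
    else digitPositions rest (i + 1)

def cambiar_x2_alt (cad : String) (rmax : Int) : String :=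
  if rmax = 0 then cad
  else
    let cs := cad.toList
    let positions := digitPositions cs 0
    -- cut = len(cad) if rmax < 0 or rmax > len(positions) else positions[rmax-1] + 1
    let cut : Int :=
      if rmax < 0 ∨ (positions.length : Int) < rmax then (cs.length : Int)
      else (PySem.List.pyGet? positions (rmax - 1)).getD 0 + 1
    -- "".join("X" if c.isdigit() else c for c in cad[:cut]) + cad[cut:]
    String.ofList
      ((PySem.List.slice cs none (some cut)).map
          (fun c => if PySem.Chars.isdigit c then 'X' else c)
        ++ PySem.List.slice cs (some cut) none)

-- ===== PRECONDITION & SPEC =====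
def Spec_cambiar_x2 (cad : String) (rmax : Int) (out : String) : Prop := out = cambiar_x2_alt cad rmax
instance (cad : String) (rmax : Int) (out : String) : Decidable (Spec_cambiar_x2 cad rmax out) := by unfold Spec_cambiar_x2; infer_instance

-- ===== CLAIM (what is proved, stated in full; the proofs are below) =====
def Claim_equal_cambiar_x2 : Prop := ∀ (cad : String) (rmax : Int), Dom_cambiar_x2 cad rmax → Spec_cambiar_x2 cad rmax (cambiar_x2 cad rmax)

-- ===== LEMMAS AND PROOFS =====

-- PySem's ASCII isdigit is Char.isDigit
theorem isdigit_eq (c : Char) : PySem.Chars.isdigit c = c.isDigit := rfl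

-- membership in the literal digit list is exactly the digit test
theorem digit_mem_iff (c : Char) : c ∈ ("0123456789".toList) ↔ c.isDigit = true := by
  constructor
  · intro h
    rw [show ("0123456789".toList) = ['0','1','2','3','4','5','6','7','8','9'] from rfl] at h
    fin_cases h <;> decide
  · intro hd
    have h1 : 48 ≤ c.toNat := by
      simp only [Char.isDigit, Bool.and_eq_true, decide_eq_true_eq] at hd
      exact UInt32.le_iff_toNat_le.mp hd.1
    have h2 : c.toNat ≤ 57 := by
      simp only [Char.isDigit, Bool.and_eq_true, decide_eq_true_eq] at hd
      exact UInt32.le_iff_toNat_le.mp hd.2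
    have hofn : Char.ofNat c.toNat = c := Char.ofNat_toNat c
    rw [show ("0123456789".toList) = ['0','1','2','3','4','5','6','7','8','9'] from rfl, ← hofn]
    interval_cases (c.toNat) <;> decide

-- A's `cad[i] in digitos` test equals B's isdigit test
theorem digit_test_eq (c : Char) :
    PySem.Chars.isIn [c] ("0123456789".toList) = PySem.Chars.isdigit c := by
  rw [isdigit_eq]
  by_cases h : c.isDigit = true
  · rw [h]
    exact (PySem.Chars.isIn_iff_infix _ _).mpr
      ((List.singleton_infix_iff _ _).mpr ((digit_mem_iff c).mpr h))
  · rw [Bool.not_eq_true] at h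
    rw [h]
    exact (PySem.Chars.isIn_eq_false_iff _ _).mpr
      (fun hinf => by
        have := (digit_mem_iff c).mp ((List.singleton_infix_iff _ _).mp hinf)
        simp [this] at h)

-- Nat-level digit positions (proof device for B's `positions`)
def ndp : List Char → List Nat
  | [] => []
  | c :: rest => if c.isDigit then 0 :: (ndp rest).map (· + 1) else (ndp rest).map (· + 1)

theorem dp_shift : ∀ (cs : List Char) (i : Int),
    digitPositions cs i = (ndp cs).map (fun (n : Nat) => (n : Int) + i) := by
  intro cs
  induction cs with
  | nil => intro i; rfl
  | cons c rest ih =>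
    intro i
    rw [digitPositions, ndp, isdigit_eq]
    by_cases hd : c.isDigit = true
    · rw [hd, if_pos rfl, if_pos rfl, List.map_cons, List.map_map, ih (i + 1)]
      congr 1
      · push_cast; ring
      · apply List.map_congr_left; intro n _; simp only [Function.comp_apply]; push_cast; ring
    · rw [Bool.not_eq_true] at hd
      rw [hd, if_neg (by simp), if_neg (by simp), List.map_map, ih (i + 1)]
      apply List.map_congr_left; intro n _; simp only [Function.comp_apply]; push_cast; ring

-- the cut index, Nat-level
def cutN (cs : List Char) (k : Int) : Nat :=
  if k < 0 ∨ ((ndp cs).length : Int) < k then cs.length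
  else (ndp cs).getD (k - 1).toNat 0 + 1

-- B's output, Nat-level
def replC (c : Char) : Char := if c.isDigit then 'X' else c
def bOutN (cs : List Char) (n : Nat) : List Char := (cs.take n).map replC ++ cs.drop n

theorem getD_map_succ (P : List Nat) (i : Nat) (h : i < P.length) :
    (P.map (· + 1)).getD i 0 = P.getD i 0 + 1 := by
  simp [List.getD_eq_getElem?_getD, List.getElem?_map, List.getElem?_eq_getElem h]

theorem cutN_cons_digit_one (c : Char) (cs : List Char) (hd : c.isDigit = true) :
    cutN (c :: cs) 1 = 1 := by
  rw [cutN, ndp, hd, if_pos rfl]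
  rw [if_neg (by simp only [List.length_cons, List.length_map]; push_cast; simp only [false_or]; omega)]
  simp

theorem cutN_cons_digit (c : Char) (cs : List Char) (k : Int) (hd : c.isDigit = true)
    (hk : 2 <= k) : cutN (c :: cs) k = cutN cs (k - 1) + 1 := by
  rw [cutN, cutN, ndp, hd, if_pos rfl]
  simp only [List.length_cons, List.length_map]
  by_cases hlen : ((ndp cs).length : Int) < k - 1
  · rw [if_pos (by push_cast; omega), if_pos (by omega)]
  · rw [if_neg (by push_cast; omega), if_neg (by omega)]
    have hi : (k - 1).toNat = (k - 2).toNat + 1 := by omega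
    rw [hi]
    simp only [List.getD_cons_succ]
    have hrange : (k - 2).toNat < (ndp cs).length := by omega
    rw [getD_map_succ _ _ hrange]
    have h2 : (k - 1 - 1).toNat = (k - 2).toNat := by omega
    rw [h2]

theorem cutN_cons_nondigit (c : Char) (cs : List Char) (k : Int) (hd : c.isDigit = false)
    (hk : 1 ≤ k) : cutN (c :: cs) k = cutN cs k + 1 := by
  rw [cutN, cutN, ndp, hd]
  simp only [Bool.false_eq_true, if_false, List.length_map, List.length_cons]
  by_cases hlen : ((ndp cs).length : Int) < k
  · rw [if_pos (by omega), if_pos (by omega)]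
  · rw [if_neg (by omega), if_neg (by omega)]
    have hrange : (k - 1).toNat < (ndp cs).length := by omega
    rw [getD_map_succ _ _ hrange]

theorem bOutN_cons (c : Char) (cs : List Char) (n : Nat) :
    bOutN (c :: cs) (n + 1) = replC c :: bOutN cs n := by
  simp [bOutN]

-- negative rmax: the break never fires, every digit is replaced
theorem loop_neg (rmax : Int) (h : rmax < 0) :
    ∀ (cs : List Char) (rep : Int), 0 ≤ rep →
      cambiarALoop rmax cs rep = cs.map replC := by
  intro cs
  induction cs with
  | nil => intro rep _; rfl
  | cons c rest ih =>
    intro rep hrep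
    rw [cambiarALoop, digit_test_eq, isdigit_eq, List.map_cons, replC]
    by_cases hd : c.isDigit = true
    · rw [hd]
      simp only [if_true]
      rw [if_neg (by omega), ih (rep + 1) (by omega)]
    · rw [Bool.not_eq_true] at hd
      rw [hd]
      simp only [Bool.false_eq_true, if_false]
      rw [ih rep hrep]

-- positive case: with k = rmax - rep replacements left, the loop produces bOutN at cutN
theorem loop_pos (rmax : Int) :
    ∀ (cs : List Char) (k : Int), 1 ≤ k →
      cambiarALoop rmax cs (rmax - k) = bOutN cs (cutN cs k) := by
  intro cs
  induction cs with
  | nil => intro k _; simp [cambiarALoop, bOutN]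
  | cons c rest ih =>
    intro k hk
    rw [cambiarALoop, digit_test_eq, isdigit_eq]
    by_cases hd : c.isDigit = true
    · rw [hd]
      simp only [if_true]
      by_cases h1 : k = 1
      · subst h1
        rw [if_pos (by omega), cutN_cons_digit_one c rest hd]
        show 'X' :: rest = bOutN (c :: rest) (0 + 1)
        rw [bOutN_cons, replC, hd, if_pos rfl, bOutN]
        simp
      · rw [if_neg (by omega), cutN_cons_digit c rest k hd (by omega), bOutN_cons,
            replC, hd, if_pos rfl]
        have : rmax - k + 1 = rmax - (k - 1) := by omega
        rw [this, ih (k - 1) (by omega)]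
    · rw [Bool.not_eq_true] at hd
      rw [hd]
      simp only [Bool.false_eq_true, if_false]
      rw [cutN_cons_nondigit c rest k hd hk, bOutN_cons, replC, hd]
      simp only [Bool.false_eq_true, if_false]
      rw [ih k hk]

-- B's port, rewritten to the Nat-level cut/output
theorem map_cast_ndp (cs : List Char) :
    digitPositions cs 0 = (ndp cs).map (fun (n : Nat) => (n : Int)) := by
  rw [dp_shift]
  apply List.map_congr_left; intro n _; ring

theorem pyGet_cast (P : List Nat) (k : Int) (h0 : 0 <= k) (h : k.toNat < P.length) :
    PySem.List.pyGet? (P.map (fun (n : Nat) => (n : Int))) k = some ((P.getD k.toNat 0 : Nat) : Int) := by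
  rw [PySem.List.pyGet?_of_nonneg _ h0]
  simp [List.getElem?_map, List.getElem?_eq_getElem h, List.getD_eq_getElem?_getD]

theorem alt_eq (cad : String) (rmax : Int) (h0 : rmax ≠ 0) :
    cambiar_x2_alt cad rmax = String.ofList (bOutN cad.toList (cutN cad.toList rmax)) := by
  rw [cambiar_x2_alt, if_neg h0]
  show String.ofList _ = _
  rw [map_cast_ndp]
  simp only [List.length_map]
  congr 1
  by_cases hcase : rmax < 0 ∨ ((ndp cad.toList).length : Int) < rmax
  · rw [if_pos hcase]
    rw [PySem.List.slice_to_natCast, PySem.List.slice_from_natCast]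
    rw [cutN, if_pos hcase]
    unfold bOutN
    congr 1
  · rw [if_neg hcase]
    push Not at hcase
    have hrange : (rmax - 1).toNat < (ndp cad.toList).length := by omega
    rw [pyGet_cast _ _ (by omega) hrange]
    simp only [Option.getD_some]
    rw [show ((((ndp cad.toList).getD (rmax - 1).toNat 0 : Nat) : Int) + 1)
        = (((ndp cad.toList).getD (rmax - 1).toNat 0 + 1 : Nat) : Int) from by push_cast; ring]
    rw [PySem.List.slice_to_natCast, PySem.List.slice_from_natCast]
    rw [cutN, if_neg (by omega)]
    unfold bOutN
    congr 1

-- ===== VERDICT (by name: the statement is the Claim_ definition above) =====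
theorem cambiar_x2_spec : Claim_equal_cambiar_x2 := by
  intro cad rmax _
  unfold Spec_cambiar_x2
  by_cases h0 : rmax = 0
  · simp [h0, cambiar_x2, cambiar_x2_alt]
  · rw [alt_eq cad rmax h0, cambiar_x2, if_neg h0]
    congr 1
    rcases lt_or_gt_of_ne h0 with h | h
    · rw [loop_neg rmax h _ 0 le_rfl, cutN, if_pos (Or.inl h)]
      unfold bOutN
      rw [List.take_length, List.drop_length, List.append_nil]
    · rw [show (0 : Int) = rmax - rmax from by ring, loop_pos rmax _ rmax (by omega)]
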